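-- pv_equiv track=rewrite | github.com/Peterdir/Personal-Assignments | Expert-System.py | inference_engine
-- ===== SOURCE A (Python) =====
-- rules = [
--     {
--         "conditions": {"exercise": True},
--         "conclusion": "Bạn đừng bỏ lỡ bài kiểm tra quan trọng!"
--     },
--     {
--         "conditions": {"raining": True, "sick": True},
--         "conclusion": "Bạn nên ở nhà, nếu không bạn sẽ bị cảm nặng hơn!"
--     },
--     {
--         "conditions": {"raining": True},
--         "conclusion": "Bạn nên mặc áo mưa vào để đi học."
--     },
--     {
--         "conditions": {"sick": True},
--         "conclusion": "Hãy uống thuốc sau đó đi học, cố lên!!!"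
--     },
--     {
--         "conditions": {},
--         "conclusion": "Hãy đến trường để học được những kiến thức thú vị :)"
--     }
-- ]
--
-- def inference_engine(facts):
--     for rule in rules:
--         check = True
--
--         for key, value in rule["conditions"].items():
--             if(facts.get(key) != value):
--                 check = False
--         if(check):
--             return rule["conclusion"]
--     return "Không có kết luận phù hợp"
-- ===== SOURCE B (Python) =====
-- def inference_engine(facts):
--     # Same priorities as the rules table, written as a direct if/elif chain.
--     if facts.get("exercise") == True:
--         return "Bạn đừng bỏ lỡ bài kiểm tra quan trọng!"
--     elif facts.get("raining") == True and facts.get("sick") == True: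
--         return "Bạn nên ở nhà, nếu không bạn sẽ bị cảm nặng hơn!"
--     elif facts.get("raining") == True:
--         return "Bạn nên mặc áo mưa vào để đi học."
--     elif facts.get("sick") == True:
--         return "Hãy uống thuốc sau đó đi học, cố lên!!!"
--     else:
--         return "Hãy đến trường để học được những kiến thức thú vị :)"
-- ===== Notes on version B (the rewrite author's own statement) =====
-- stated objective: simpler
-- what changed: Replaces the data-driven loop over the module-level rules table (with an inner condition-matching loop) by a direct if/elif chain testing the three fact keys in the same priority order.
import Mathlib
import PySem

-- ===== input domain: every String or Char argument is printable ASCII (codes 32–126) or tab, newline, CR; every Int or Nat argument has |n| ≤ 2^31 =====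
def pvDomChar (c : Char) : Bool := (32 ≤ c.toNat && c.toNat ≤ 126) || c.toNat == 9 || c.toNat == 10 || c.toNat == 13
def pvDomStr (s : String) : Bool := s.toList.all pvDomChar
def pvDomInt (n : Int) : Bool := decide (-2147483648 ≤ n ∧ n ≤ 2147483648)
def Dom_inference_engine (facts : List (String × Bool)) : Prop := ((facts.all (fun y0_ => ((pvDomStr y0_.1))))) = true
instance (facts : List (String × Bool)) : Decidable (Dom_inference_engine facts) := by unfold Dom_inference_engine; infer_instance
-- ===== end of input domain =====

-- B replaces A's table-driven rule loop by a direct if/elif chain in the same priority order (objective: simpler).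

-- ===== PORT A =====
-- facts.get(key): first match in the association list (dict lookup)
def pvFactsGet (facts : List (String × Bool)) (k : String) : Option Bool :=
  List.lookup k facts

-- the module-level rules table: (conditions dict, conclusion)
def pvRules : List (List (String × Bool) × String) :=
  [ ([("exercise", true)], "Bạn đừng bỏ lỡ bài kiểm tra quan trọng!"),
    ([("raining", true), ("sick", true)], "Bạn nên ở nhà, nếu không bạn sẽ bị cảm nặng hơn!"),
    ([("raining", true)], "Bạn nên mặc áo mưa vào để đi học."),
    ([("sick", true)], "Hãy uống thuốc sau đó đi học, cố lên!!!"),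
    ([], "Hãy đến trường để học được những kiến thức thú vị :)") ]

-- inner loop: check = True; for key, value in conditions: if facts.get(key) != value: check = False
def pvCheck (facts : List (String × Bool)) (conds : List (String × Bool)) : Bool :=
  conds.foldl (fun ch kv => if pvFactsGet facts kv.1 ≠ some kv.2 then false else ch) true

-- outer loop over the rules list
def pvLoopA (facts : List (String × Bool)) : List (List (String × Bool) × String) → String
  | [] => "Không có kết luận phù hợp"
  | r :: rest => if pvCheck facts r.1 then r.2 else pvLoopA facts rest

def inference_engine (facts : List (String × Bool)) : String :=
  pvLoopA facts pvRules

-- ===== PORT B =====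
def inference_engine_alt (facts : List (String × Bool)) : String :=
  if pvFactsGet facts "exercise" = some true then
    "Bạn đừng bỏ lỡ bài kiểm tra quan trọng!"
  else if pvFactsGet facts "raining" = some true ∧ pvFactsGet facts "sick" = some true then
    "Bạn nên ở nhà, nếu không bạn sẽ bị cảm nặng hơn!"
  else if pvFactsGet facts "raining" = some true then
    "Bạn nên mặc áo mưa vào để đi học."
  else if pvFactsGet facts "sick" = some true then
    "Hãy uống thuốc sau đó đi học, cố lên!!!"
  else
    "Hãy đến trường để học được những kiến thức thú vị :)"

-- ===== PRECONDITION & SPEC =====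
def Spec_inference_engine (facts : List (String × Bool)) (out : String) : Prop := out = inference_engine_alt facts
instance (facts : List (String × Bool)) (out : String) : Decidable (Spec_inference_engine facts out) := by unfold Spec_inference_engine; infer_instance

-- ===== CLAIM (what is proved, stated in full; the proofs are below) =====
def Claim_equal_inference_engine : Prop := ∀ (facts : List (String × Bool)), Dom_inference_engine facts → Spec_inference_engine facts (inference_engine facts)

-- ===== LEMMAS AND PROOFS =====

-- ===== VERDICT (by name: the statement is the Claim_ definition above) =====
theorem inference_engine_spec : Claim_equal_inference_engine := by
  intro facts _
  unfold Spec_inference_engine inference_engine inference_engine_alt pvRules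
  simp only [pvLoopA, pvCheck, List.foldl]
  rcases he : pvFactsGet facts "exercise" with _ | (_ | _) <;>
    rcases hr : pvFactsGet facts "raining" with _ | (_ | _) <;>
      rcases hs : pvFactsGet facts "sick" with _ | (_ | _) <;>
        simp_all
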